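-- pv_equiv track=rewrite | github.com/vlbthambawita/CardioMAS | src/cardiomas/rag/retriever.py | _keyword_match_fallback
-- ===== SOURCE A (Python) =====
-- _SPLIT_KEYWORDS = [
--     "train", "validation", "test", "split", "partition",
--     "stratif", "patient", "ratio", "fold", "cross-validation",
--     "exclusion", "criteria", "official", "random", "random seed",
-- ]
--
-- def _keyword_match_fallback(chunks: list[str], top_n: int) -> list[int]:
--     """Simple keyword hit count as a BM25 fallback."""
--     scores = []
--     for i, chunk in enumerate(chunks):
--         lower = chunk.lower()
--         score = sum(1 for kw in _SPLIT_KEYWORDS if kw in lower)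
--         scores.append((i, score))
--     scores.sort(key=lambda x: x[1], reverse=True)
--     return [i for i, _ in scores[:top_n]]
-- ===== SOURCE B (Python) =====
-- _SPLIT_KEYWORDS = [
--     "train", "validation", "test", "split", "partition",
--     "stratif", "patient", "ratio", "fold", "cross-validation",
--     "exclusion", "criteria", "official", "random", "random seed",
-- ]
--
-- def _keyword_match_fallback(chunks: list[str], top_n: int) -> list[int]:
--     """Bucket the indices by keyword-hit count (scores are bounded by the
--     keyword list length), then emit buckets from highest score down: a
--     counting sort replacing the comparison sort."""
--     scores = [sum(kw in c.lower() for kw in _SPLIT_KEYWORDS) for c in chunks]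
--     ranked = [i for s in range(len(_SPLIT_KEYWORDS), -1, -1)
--                 for i, sc in enumerate(scores) if sc == s]
--     return ranked[:top_n]
-- ===== Notes on version B (the rewrite author's own statement) =====
-- stated objective: alternative
-- what changed: Replaces building (index,score) pairs and stable reverse-sorting them with a counting/bucket pass: scores are computed once, then indices are emitted score-group by score-group from the highest possible score down (scores are bounded by the keyword count), exploiting that stable reverse sort on small bounded keys is exactly grouped selection.
import Mathlib
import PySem

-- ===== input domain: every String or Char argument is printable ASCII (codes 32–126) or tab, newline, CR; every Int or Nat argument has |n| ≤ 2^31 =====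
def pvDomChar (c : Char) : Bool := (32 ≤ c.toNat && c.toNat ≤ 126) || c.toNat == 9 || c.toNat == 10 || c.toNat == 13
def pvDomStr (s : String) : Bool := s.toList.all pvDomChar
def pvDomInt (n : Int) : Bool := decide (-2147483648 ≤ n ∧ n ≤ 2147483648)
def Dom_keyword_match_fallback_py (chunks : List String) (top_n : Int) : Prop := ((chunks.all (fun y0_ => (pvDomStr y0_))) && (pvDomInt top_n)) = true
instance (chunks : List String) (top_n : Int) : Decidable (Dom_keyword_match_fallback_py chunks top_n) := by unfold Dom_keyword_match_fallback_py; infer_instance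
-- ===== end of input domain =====

-- B replaces the stable reverse comparison-sort of (index, score) pairs by a counting/grouping pass over the
-- bounded scores (objective: alternative decomposition, same exact output).

-- the module constant _SPLIT_KEYWORDS (shared context of both programs)
def pvKeywords : List String :=
  ["train", "validation", "test", "split", "partition",
   "stratif", "patient", "ratio", "fold", "cross-validation",
   "exclusion", "criteria", "official", "random", "random seed"]

-- ===== PORT A =====
def keyword_match_fallback_py (chunks : List String) (top_n : Int) : List Int :=
  let scores : List (Int × Int) :=
    (PySem.List.enumerate chunks 0).foldl
      (fun acc p =>
        let lower := PySem.Str.lower p.2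
        let score : Int := ((pvKeywords.filter (fun kw => PySem.Str.isIn kw lower)).map (fun _ => (1 : Int))).sum
        acc ++ [(p.1, score)]) []
  let sorted := PySem.List.sorted scores (fun x => x.2) true
  (PySem.List.slice sorted none (some top_n)).map (fun p => p.1)

-- ===== PORT B =====
def keyword_match_fallback_py_alt (chunks : List String) (top_n : Int) : List Int :=
  let scores : List Int :=
    chunks.map (fun c =>
      (pvKeywords.map (fun kw => if PySem.Str.isIn kw (PySem.Str.lower c) then (1 : Int) else 0)).sum)
  let ranked : List Int :=
    (PySem.List.pyRange (pvKeywords.length : Int) (-1) (-1)).flatMap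
      (fun s => ((PySem.List.enumerate scores 0).filter (fun p => p.2 == s)).map (fun p => p.1))
  PySem.List.slice ranked none (some top_n)

-- ===== PRECONDITION & SPEC =====
def Spec_keyword_match_fallback_py (chunks : List String) (top_n : Int) (out : List Int) : Prop := out = keyword_match_fallback_py_alt chunks top_n
instance (chunks : List String) (top_n : Int) (out : List Int) : Decidable (Spec_keyword_match_fallback_py chunks top_n out) := by unfold Spec_keyword_match_fallback_py; infer_instance

-- ===== CLAIM (what is proved, stated in full; the proofs are below) =====
def Claim_equal_keyword_match_fallback_py : Prop := ∀ (chunks : List String) (top_n : Int), Dom_keyword_match_fallback_py chunks top_n → Spec_keyword_match_fallback_py chunks top_n (keyword_match_fallback_py chunks top_n)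

-- ===== LEMMAS AND PROOFS =====

-- sum of 1 over a filter and sum of 0/1 indicators both count the matches
theorem pv_sum_filter_ones {α : Type} (p : α → Bool) (l : List α) :
    ((l.filter p).map (fun _ => (1 : Int))).sum = (l.countP p : Int) := by
  induction l with
  | nil => simp
  | cons x t ih =>
      by_cases h : p x <;>
        simp [List.countP_cons, h, ih, List.countP_eq_length_filter] <;> omega

theorem pv_sum_ite_eq_countP {α : Type} (p : α → Bool) (l : List α) :
    (l.map (fun x => if p x then (1 : Int) else 0)).sum = (l.countP p : Int) := by
  induction l with
  | nil => simp
  | cons x t ih =>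
      by_cases h : p x <;>
        simp [List.countP_cons, h, ih, List.countP_eq_length_filter] <;> omega

-- enumerate of a mapped list
theorem pv_enumerate_map {α β : Type} (f : α → β) (xs : List α) (s : Int) :
    PySem.List.enumerate (xs.map f) s = (PySem.List.enumerate xs s).map (fun p => (p.1, f p.2)) := by
  induction xs generalizing s with
  | nil => simp [PySem.List.enumerate_nil]
  | cons x t ih => simp [PySem.List.enumerate_cons, ih]

-- xs[:b] commutes with map
theorem pv_slice_map {α β : Type} (f : α → β) (xs : List α) (b : Int) :
    (PySem.List.slice xs none (some b)).map f = PySem.List.slice (xs.map f) none (some b) := by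
  simp [PySem.List.slice, List.map_take]

-- inserting past a block the element does not go before
theorem pv_insertBy_skip {α : Type} (before : α → α → Bool) (x : α) (g rest : List α)
    (h : ∀ y ∈ g, before x y = false) :
    PySem.List.insertBy before x (g ++ rest) = g ++ PySem.List.insertBy before x rest := by
  induction g with
  | nil => simp
  | cons y t ih =>
      have hy : before x y = false := h y (List.mem_cons_self ..)
      simp [PySem.List.insertBy, hy, ih (fun z hz => h z (List.mem_cons_of_mem _ hz))]

-- members of a grouped concatenation carry a score from the score list
theorem pv_mem_gc (S : List Int) (ps : List (Int × Int)) (y : Int × Int)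
    (hy : y ∈ S.flatMap (fun s => ps.filter (fun p => p.2 == s))) : y.2 ∈ S := by
  rcases List.mem_flatMap.mp hy with ⟨s, hs, hmem⟩
  have := (List.mem_filter.mp hmem).2
  simpa [beq_iff_eq.mp this] using hs

-- appending an element whose score is outside the score list does not change the groups
theorem pv_gc_append_notmem (S : List Int) (ps : List (Int × Int)) (x : Int × Int)
    (hx : x.2 ∉ S) :
    S.flatMap (fun s => (ps ++ [x]).filter (fun p => p.2 == s))
      = S.flatMap (fun s => ps.filter (fun p => p.2 == s)) := by
  refine List.flatMap_congr (fun s hs => ?_)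
  have hne : (x.2 == s) = false := by
    refine beq_eq_false_iff_ne.mpr (fun h => hx ?_); simpa [h] using hs
  simp [List.filter_append, hne]

-- stable insertion into a strictly-descending grouped concatenation appends x at the end of its group
theorem pv_insert_gc (S : List Int) (hS : S.Pairwise (· > ·)) (ps : List (Int × Int))
    (x : Int × Int) (hx : x.2 ∈ S) :
    PySem.List.insertBy (fun a b => decide (b.2 < a.2)) x
        (S.flatMap (fun s => ps.filter (fun p => p.2 == s)))
      = S.flatMap (fun s => (ps ++ [x]).filter (fun p => p.2 == s)) := by
  induction S generalizing ps with
  | nil => cases hx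
  | cons s S' ih =>
      rcases List.pairwise_cons.mp hS with ⟨hhead, htail⟩
      by_cases hxs : x.2 = s
      · -- x belongs to the head group: skip it, then x goes right at the boundary
        have hskip : ∀ y ∈ ps.filter (fun p => p.2 == s),
            (decide (y.2 < x.2) : Bool) = false := by
          intro y hy
          have := beq_iff_eq.mp (List.mem_filter.mp hy).2
          simp [this, hxs]
        have hnot : x.2 ∉ S' := fun h => absurd (hhead _ h) (by simp [hxs])
        have hrest : PySem.List.insertBy (fun a b => decide (b.2 < a.2)) x
            (S'.flatMap (fun s => ps.filter (fun p => p.2 == s)))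
            = x :: S'.flatMap (fun s => ps.filter (fun p => p.2 == s)) := by
          cases hr : S'.flatMap (fun s => ps.filter (fun p => p.2 == s)) with
          | nil => simp [PySem.List.insertBy]
          | cons z r =>
              have hz : z.2 ∈ S' := pv_mem_gc S' ps z (by rw [hr]; exact List.mem_cons_self ..)
              have : (decide (z.2 < x.2) : Bool) = true := by
                simp [hxs]; exact hhead _ hz
              simp [PySem.List.insertBy, this]
        rw [List.flatMap_cons, List.flatMap_cons,
            pv_insertBy_skip _ _ _ _ hskip, hrest, pv_gc_append_notmem S' ps x hnot]
        simp [List.filter_append, hxs]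
      · -- x belongs to a deeper group: skip the head group and recurse
        have hx' : x.2 ∈ S' := by cases hx with
          | head => exact absurd rfl hxs
          | tail _ h => exact h
        have hlt : x.2 < s := hhead _ hx'
        have hskip : ∀ y ∈ ps.filter (fun p => p.2 == s),
            (decide (y.2 < x.2) : Bool) = false := by
          intro y hy
          have := beq_iff_eq.mp (List.mem_filter.mp hy).2
          simp [this]; omega
        have hne : (x.2 == s) = false := beq_eq_false_iff_ne.mpr hxs
        rw [List.flatMap_cons, List.flatMap_cons,
            pv_insertBy_skip _ _ _ _ hskip, ih htail ps hx']
        simp [List.filter_append, hne]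

-- the stable reverse insertion sort of a score-bounded list IS the grouped concatenation
theorem pv_sorted_rev_eq_gc (S : List Int) (hS : S.Pairwise (· > ·)) (ps : List (Int × Int))
    (hb : ∀ p ∈ ps, p.2 ∈ S) :
    PySem.List.sorted ps (fun x => x.2) true
      = S.flatMap (fun s => ps.filter (fun p => p.2 == s)) := by
  rw [PySem.List.sorted_rev_eq_foldl_insertBy]
  induction ps using List.reverseRecOn with
  | nil => simp
  | append_singleton t x ih =>
      rw [List.foldl_append, List.foldl_cons, List.foldl_nil,
          ih (fun p hp => hb p (List.mem_append_left _ hp))]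
      exact pv_insert_gc S hS t x (hb x (List.mem_append_right _ (List.mem_cons_self ..)))

-- the descending score range and the bound on scores
theorem pv_range_desc : PySem.List.pyRange ((pvKeywords.length : Nat) : Int) (-1) (-1)
    = [15, 14, 13, 12, 11, 10, 9, 8, 7, 6, 5, 4, 3, 2, 1, 0] := by decide

-- assembling the equivalence
theorem pv_main (chunks : List String) (top_n : Int) :
    keyword_match_fallback_py chunks top_n = keyword_match_fallback_py_alt chunks top_n := by
  unfold keyword_match_fallback_py keyword_match_fallback_py_alt
  simp only [pv_sum_filter_ones, pv_sum_ite_eq_countP,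
             PySem.List.foldl_append_singleton_eq_map, List.nil_append, pv_enumerate_map, pv_range_desc]
  rw [pv_slice_map]
  congr 1
  rw [pv_sorted_rev_eq_gc [15, 14, 13, 12, 11, 10, 9, 8, 7, 6, 5, 4, 3, 2, 1, 0]
        (by decide) _ ?hb, List.map_flatMap]
  case hb =>
    intro p hp
    rcases List.mem_map.mp hp with ⟨q, _, rfl⟩
    have hle : List.countP (fun kw => PySem.Str.isIn kw (PySem.Str.lower q.2)) pvKeywords
        ≤ pvKeywords.length := List.countP_le_length
    have h15 : pvKeywords.length = 15 := by decide
    rw [h15] at hle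
    set n := List.countP (fun kw => PySem.Str.isIn kw (PySem.Str.lower q.2)) pvKeywords with hn
    interval_cases n <;> simp

-- ===== VERDICT (by name: the statement is the Claim_ definition above) =====
theorem keyword_match_fallback_py_spec : Claim_equal_keyword_match_fallback_py := by
  intro chunks top_n _
  exact pv_main chunks top_n
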